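-- pv_equiv track=rewrite | github.com/Ade-Adeleke/RaydaHelpdesk | src/helpdesk/core/escalation_logic.py | _matches_trigger
-- ===== SOURCE A (Python) =====
-- def _matches_trigger(request: str, trigger: str) -> bool:
--     """Check if request matches an escalation trigger"""
--     # Convert to lowercase for case-insensitive matching
--     request_lower = request.lower()
--     trigger_lower = trigger.lower()
--
--     # Direct substring match
--     if trigger_lower in request_lower:
--         return True
--
--     # Check for keyword variations
--     trigger_words = trigger_lower.split()
--     request_words = request_lower.split()
--
--     # If all trigger words are found in request
--     return all(any(tw in rw for rw in request_words) for tw in trigger_words)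
-- ===== SOURCE B (Python) =====
-- def _matches_trigger(request: str, trigger: str) -> bool:
--     """Check if request matches an escalation trigger"""
--     request_lower = request.lower()
--     trigger_lower = trigger.lower()
--
--     if trigger_lower in request_lower:
--         return True
--
--     trigger_words = trigger_lower.split()
--     request_words = request_lower.split()
--
--     # Index every window of a request word whose length is a trigger-word length,
--     # then answer each trigger word by one set lookup (no per-trigger-word scan).
--     lengths = sorted({len(tw) for tw in trigger_words})
--     windows = set()
--     for rw in request_words:
--         for L in lengths:
--             for i in range(len(rw) - L + 1):
--                 windows.add(rw[i:i + L])
--     return all(tw in windows for tw in trigger_words)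
-- ===== Notes on version B (the rewrite author's own statement) =====
-- stated objective: alternative
-- what changed: Instead of scanning the request words per trigger word with all(any(tw in rw ...)), B computes the set of trigger-word lengths, builds one set index of every request-word window of those lengths, and answers each trigger word by a single set lookup.
import Mathlib
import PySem

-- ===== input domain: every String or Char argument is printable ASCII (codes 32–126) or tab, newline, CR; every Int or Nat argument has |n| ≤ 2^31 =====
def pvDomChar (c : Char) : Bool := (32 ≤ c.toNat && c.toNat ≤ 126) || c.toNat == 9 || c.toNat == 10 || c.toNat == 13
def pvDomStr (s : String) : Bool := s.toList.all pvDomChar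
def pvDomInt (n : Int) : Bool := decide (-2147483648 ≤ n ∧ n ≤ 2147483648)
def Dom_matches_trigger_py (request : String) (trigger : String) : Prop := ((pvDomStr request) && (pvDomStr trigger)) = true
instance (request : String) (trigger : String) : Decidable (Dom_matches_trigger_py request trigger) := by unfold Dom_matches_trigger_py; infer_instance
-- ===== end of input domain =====

-- B replaces the per-trigger-word nested scan with a set index of all request-word windows
-- of the trigger-word lengths, each trigger word then answered by one lookup (objective: alternative).

-- ===== PORT A =====
def matches_trigger_py (request : String) (trigger : String) : Bool :=
  let request_lower := PySem.Str.lower request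
  let trigger_lower := PySem.Str.lower trigger
  if PySem.Str.isIn trigger_lower request_lower then true
  else
    let trigger_words := PySem.Str.split₀ trigger_lower
    let request_words := PySem.Str.split₀ request_lower
    trigger_words.all (fun tw => request_words.any (fun rw => PySem.Str.isIn tw rw))

-- ===== PORT B =====
def matches_trigger_py_alt (request : String) (trigger : String) : Bool :=
  let request_lower := PySem.Str.lower request
  let trigger_lower := PySem.Str.lower trigger
  if PySem.Str.isIn trigger_lower request_lower then true
  else
    let trigger_words := PySem.Str.split₀ trigger_lower
    let request_words := PySem.Str.split₀ request_lower
    let lengths : List Int :=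
      PySem.List.sorted (PySem.Set.ofList (trigger_words.map PySem.Str.len)) (fun x => x) false
    let windows : PySem.Set String :=
      request_words.foldl (fun s rw =>
        lengths.foldl (fun s L =>
          (PySem.List.pyRange 0 (PySem.Str.len rw - L + 1) 1).foldl (fun s i =>
            PySem.Set.add s (PySem.Str.slice rw (some i) (some (i + L)))) s) s)
        PySem.Set.empty
    trigger_words.all (fun tw => PySem.Set.contains windows tw)

-- ===== PRECONDITION & SPEC =====
def Spec_matches_trigger_py (request : String) (trigger : String) (out : Bool) : Prop := out = matches_trigger_py_alt request trigger
instance (request : String) (trigger : String) (out : Bool) : Decidable (Spec_matches_trigger_py request trigger out) := by unfold Spec_matches_trigger_py; infer_instance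

-- ===== CLAIM (what is proved, stated in full; the proofs are below) =====
def Claim_equal_matches_trigger_py : Prop := ∀ (request : String) (trigger : String), Dom_matches_trigger_py request trigger → Spec_matches_trigger_py request trigger (matches_trigger_py request trigger)

-- ===== LEMMAS AND PROOFS =====

-- membership after folding a step that only adds elements described by P
lemma mem_foldl_step {α : Type} (step : PySem.Set String → α → PySem.Set String)
    (P : α → String → Prop)
    (h : ∀ s a x, x ∈ step s a ↔ x ∈ s ∨ P a x) :
    ∀ (l : List α) (s : PySem.Set String) (x : String),
      x ∈ l.foldl step s ↔ x ∈ s ∨ ∃ a ∈ l, P a x := by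
  intro l
  induction l with
  | nil => simp
  | cons a rest ih =>
    intro s x
    simp only [List.foldl_cons, ih, h]
    constructor
    · rintro ((hs | hp) | ⟨b, hb, hpb⟩)
      · exact Or.inl hs
      · exact Or.inr ⟨a, List.mem_cons_self, hp⟩
      · exact Or.inr ⟨b, List.mem_cons_of_mem _ hb, hpb⟩
    · rintro (hs | ⟨b, hb, hpb⟩)
      · exact Or.inl (Or.inl hs)
      · rcases List.mem_cons.mp hb with hb | hb
        · exact Or.inl (Or.inr (hb ▸ hpb))
        · exact Or.inr ⟨b, hb, hpb⟩

-- Str.len is the coerced list length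
lemma strLen_eq (s : String) : PySem.Str.len s = (s.toList.length : Int) := by
  simp [pysem]

-- a window rw[i:i+L] with i drawn from the range is exactly an occurrence in rw of a
-- string of length L
lemma window_iff (rw x : String) (L : Int) (hL : 0 ≤ L) :
    (∃ i ∈ PySem.List.pyRange 0 (PySem.Str.len rw - L + 1) 1,
        x = PySem.Str.slice rw (some i) (some (i + L))) ↔
      ((x.toList.length : Int) = L ∧ PySem.Str.isIn x rw = true) := by
  rw [PySem.Str.isIn_iff_infix]
  constructor
  · rintro ⟨i, hi, heq⟩
    rw [PySem.List.mem_pyRange_one, strLen_eq] at hi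
    have hi0 : 0 ≤ i := hi.1
    have hiL : i + L ≤ (rw.toList.length : Int) := by omega
    have hx : x.toList = (rw.toList.drop i.toNat).take ((i + L).toNat - i.toNat) := by
      rw [heq, PySem.Str.toList_slice, PySem.Chars.slice_eq_listSlice,
        PySem.List.slice_toNat _ hi0 (by omega)]
    have hnat : (i + L).toNat - i.toNat = L.toNat := by omega
    constructor
    · rw [hx, List.length_take, List.length_drop, hnat]
      omega
    · rw [hx]
      exact ((List.take_prefix _ _).isInfix.trans (List.drop_suffix _ _).isInfix)
  · rintro ⟨hlen, s, t, hst⟩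
    have hLen : rw.toList.length = s.length + x.toList.length + t.length := by
      rw [← hst]; simp; omega
    refine ⟨(s.length : Int), ?_, ?_⟩
    · rw [PySem.List.mem_pyRange_one, strLen_eq]; constructor <;> omega
    · have hiL : (s.length : Int) + L = (s.length : Int) + (x.toList.length : Int) := by omega
      have : PySem.Chars.slice rw.toList (some (s.length : Int))
          (some ((s.length : Int) + (x.toList.length : Int))) = x.toList := by
        rw [PySem.Chars.slice_eq_listSlice, PySem.List.slice_natCast_add, ← hst]
        rw [List.append_assoc, List.drop_left, List.take_left]
      apply String.ext
      rw [PySem.Str.toList_slice, hiL, this]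

-- ===== VERDICT (by name: the statement is the Claim_ definition above) =====
theorem matches_trigger_py_spec : Claim_equal_matches_trigger_py := by
  intro request trigger _
  unfold Spec_matches_trigger_py matches_trigger_py matches_trigger_py_alt
  simp only []
  split_ifs with h
  · rfl
  · set tws := PySem.Str.split₀ (PySem.Str.lower trigger) with htws
    set rws := PySem.Str.split₀ (PySem.Str.lower request) with hrws
    set lengths : List Int :=
      PySem.List.sorted (PySem.Set.ofList (tws.map PySem.Str.len)) (fun x => x) false
      with hlengths
    have hlenmem : ∀ L ∈ lengths, ∃ w ∈ tws, L = PySem.Str.len w := by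
      intro L hL
      rw [hlengths, PySem.List.mem_sorted, PySem.Set.mem_ofList, List.mem_map] at hL
      obtain ⟨w, hw, hwl⟩ := hL
      exact ⟨w, hw, hwl.symm⟩
    rw [Bool.eq_iff_iff, List.all_eq_true, List.all_eq_true]
    have hmem : ∀ x : String,
        x ∈ rws.foldl (fun s rw =>
          lengths.foldl (fun s L =>
            (PySem.List.pyRange 0 (PySem.Str.len rw - L + 1) 1).foldl (fun s i =>
              PySem.Set.add s (PySem.Str.slice rw (some i) (some (i + L)))) s) s)
          PySem.Set.empty ↔
        ((x.toList.length : Int) ∈ lengths ∧ ∃ rw ∈ rws, PySem.Str.isIn x rw = true) := by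
      intro x
      rw [mem_foldl_step _
        (fun rw x => ∃ L ∈ lengths, ∃ i ∈ PySem.List.pyRange 0 (PySem.Str.len rw - L + 1) 1,
          x = PySem.Str.slice rw (some i) (some (i + L))) ?_ rws PySem.Set.empty x]
      · constructor
        · rintro (hm | ⟨rw, hrw, L, hL, hocc⟩)
          · simp [PySem.Set.empty] at hm
          · obtain ⟨w, _, hwl⟩ := hlenmem L hL
            have h0L : 0 ≤ L := by rw [hwl, strLen_eq]; positivity
            obtain ⟨hxl, hin⟩ := (window_iff rw x L h0L).mp hocc
            exact ⟨hxl ▸ hL, rw, hrw, hin⟩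
        · rintro ⟨hxl, rw, hrw, hin⟩
          refine Or.inr ⟨rw, hrw, (x.toList.length : Int), hxl, ?_⟩
          exact (window_iff rw x _ (by positivity)).mpr ⟨rfl, hin⟩
      · intro s rw x
        rw [mem_foldl_step _
          (fun L x => ∃ i ∈ PySem.List.pyRange 0 (PySem.Str.len rw - L + 1) 1,
            x = PySem.Str.slice rw (some i) (some (i + L))) ?_]
        intro s L x
        rw [mem_foldl_step _
          (fun i x => x = PySem.Str.slice rw (some i) (some (i + L))) ?_]
        intro s i x
        rw [PySem.Set.mem_add]
    constructor
    · intro hA tw htw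
      rw [PySem.Set.contains_iff, hmem]
      refine ⟨?_, ?_⟩
      · rw [hlengths, PySem.List.mem_sorted, PySem.Set.mem_ofList, List.mem_map]
        exact ⟨tw, htw, (strLen_eq tw).symm⟩
      · obtain ⟨rw, hrw, hin⟩ := List.any_eq_true.mp (hA tw htw)
        exact ⟨rw, hrw, hin⟩
    · intro hB tw htw
      have := hB tw htw
      rw [PySem.Set.contains_iff, hmem] at this
      obtain ⟨rw, hrw, hin⟩ := this.2
      exact List.any_eq_true.mpr ⟨rw, hrw, hin⟩
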